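-- pv_equiv track=rewrite | github.com/gns9541/prac | daily_hw/prac_5-4.py | sum_of_repeat_number
-- ===== SOURCE A (Python) =====
-- def sum_of_repeat_number(num_list):
--     sum = 0
--     for i in num_list:
--         num = num_list.count(i)
--         if num == 1:
--             sum += i
--         else:
--             continue
--     return(sum)
-- ===== SOURCE B (Python) =====
-- def sum_of_repeat_number(num_list):
--     total = 0
--     run_val = 0
--     run_len = 0
--     for x in sorted(num_list):
--         if run_len > 0 and x == run_val:
--             run_len += 1
--         else:
--             if run_len == 1:
--                 total += run_val
--             run_val = x
--             run_len = 1
--     if run_len == 1: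
--         total += run_val
--     return total
-- ===== Notes on version B (the rewrite author's own statement) =====
-- stated objective: faster
-- what changed: Sorts a copy of the list and makes one linear sweep tracking runs of equal adjacent values, adding a run's value when the run has length exactly 1, instead of A's per-element full-list .count scan.
import Mathlib
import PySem

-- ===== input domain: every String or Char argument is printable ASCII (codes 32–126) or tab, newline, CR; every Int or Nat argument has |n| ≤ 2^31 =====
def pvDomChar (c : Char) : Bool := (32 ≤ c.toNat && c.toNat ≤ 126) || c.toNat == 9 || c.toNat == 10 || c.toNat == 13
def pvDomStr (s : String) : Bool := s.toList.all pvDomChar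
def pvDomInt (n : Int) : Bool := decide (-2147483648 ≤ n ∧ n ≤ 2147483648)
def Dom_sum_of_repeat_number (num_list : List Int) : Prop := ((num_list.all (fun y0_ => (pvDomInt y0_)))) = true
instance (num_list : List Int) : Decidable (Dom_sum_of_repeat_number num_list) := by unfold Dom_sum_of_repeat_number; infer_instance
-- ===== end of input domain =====

-- B sorts a copy of the list and makes one linear sweep over runs of equal adjacent
-- values, adding a value when its run has length 1, instead of A's per-element
-- full-list .count scan.

-- ===== PORT A =====
-- for i in num_list: num = num_list.count(i); if num == 1: sum += i
def sum_of_repeat_number (num_list : List Int) : Int :=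
  num_list.foldl
    (fun s i =>
      let num := PySem.List.count num_list i
      if num == 1 then s + i else s)
    0

-- ===== PORT B =====
-- one sweep over sorted(num_list) tracking (total, run_val, run_len); a new run flushes
-- the previous one (adding run_val when run_len == 1); a final flush after the loop
def sum_of_repeat_number_alt (num_list : List Int) : Int :=
  let st := (PySem.List.sorted num_list (fun x => x) false).foldl
    (fun (acc : Int × Int × Int) x =>
      let total := acc.1
      let run_val := acc.2.1
      let run_len := acc.2.2
      if run_len > 0 && x == run_val then (total, run_val, run_len + 1)
      else ((if run_len == 1 then total + run_val else total), x, 1))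
    (0, 0, 0)
  if st.2.2 == 1 then st.1 + st.2.1 else st.1

-- ===== PRECONDITION & SPEC =====
def Spec_sum_of_repeat_number (num_list : List Int) (out : Int) : Prop := out = sum_of_repeat_number_alt num_list
instance (num_list : List Int) (out : Int) : Decidable (Spec_sum_of_repeat_number num_list out) := by unfold Spec_sum_of_repeat_number; infer_instance

-- ===== CLAIM (what is proved, stated in full; the proofs are below) =====
def Claim_equal_sum_of_repeat_number : Prop := ∀ (num_list : List Int), Dom_sum_of_repeat_number num_list → Spec_sum_of_repeat_number num_list (sum_of_repeat_number num_list)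

-- ===== LEMMAS AND PROOFS =====

-- proof helper: recursive run-splitting view of the sweep
def pvGo : List Int → Int
  | [] => 0
  | x :: xs =>
    let run := xs.takeWhile (fun y => y == x)
    let rest := pvGo (xs.dropWhile (fun y => y == x))
    if run.length == 0 then x + rest else rest
termination_by s => s.length
decreasing_by
  have := (List.dropWhile_sublist (l := xs) (p := fun y => y == x)).length_le
  simpa using Nat.lt_succ_of_le this


-- A computes the sum of the elements whose count in the list is 1
theorem sum_of_repeat_number_eq_sum (l : List Int) :
    sum_of_repeat_number l = (l.filter (fun x => l.count x == 1)).sum := by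
  unfold sum_of_repeat_number
  have := PySem.List.foldl_if_eq_foldl_filter
    (l := l) (p := fun x => PySem.List.count l x == 1)
    (f := fun (acc : Int) (x : Int) => acc + x) (init := (0 : Int))
  simp only [PySem.List.count_eq] at this ⊢
  rw [this]
  have h2 := PySem.List.foldl_add (l := l.filter (fun x => List.count x l == 1))
    (g := fun x : Int => x) (a := (0 : Int))
  simpa using h2

-- in a ≤-sorted list, everything after the first run is strictly greater than the head
lemma dropWhile_gt {x : Int} {xs : List Int} (hx : ∀ y ∈ xs, x ≤ y)
    (hp : xs.Pairwise (· ≤ ·)) :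
    ∀ y ∈ xs.dropWhile (fun y => y == x), x < y := by
  cases hd : xs.dropWhile (fun y => y == x) with
  | nil => simp
  | cons h d' =>
    have hmemh : h ∈ xs := (List.dropWhile_sublist _).subset (by rw [hd]; exact List.mem_cons_self ..)
    have hneq : h ≠ x := by
      have h1 := List.head?_dropWhile_not (fun y => y == x) xs
      rw [hd] at h1
      have h2 : (h == x) = false := h1
      simpa using h2
    have hxh : x < h := lt_of_le_of_ne (hx h hmemh) (Ne.symm hneq)
    have hpd : (h :: d').Pairwise (· ≤ ·) :=
      hd ▸ hp.sublist (List.dropWhile_sublist _)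
    intro y hy
    rcases List.mem_cons.mp hy with rfl | hy'
    · exact hxh
    · exact lt_of_lt_of_le hxh ((List.pairwise_cons.mp hpd).1 y hy')

-- go on a sorted list = sum of the elements whose count is 1
theorem pvGo_eq (s : List Int) (hs : s.Pairwise (· ≤ ·)) :
    pvGo s = (s.filter (fun x => s.count x == 1)).sum := by
  induction hn : s.length using Nat.strong_induction_on generalizing s with
  | _ n ih =>
  cases s with
  | nil => simp [pvGo]
  | cons x xs =>
    have hx : ∀ y ∈ xs, x ≤ y := (List.pairwise_cons.mp hs).1
    have hxs : xs.Pairwise (· ≤ ·) := (List.pairwise_cons.mp hs).2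
    set t := xs.takeWhile (fun y => y == x) with ht
    set d := xs.dropWhile (fun y => y == x) with hdd
    have hsplit : xs = t ++ d := (List.takeWhile_append_dropWhile ..).symm
    have htx : ∀ y ∈ t, y = x := fun y hy => by
      simpa using List.mem_takeWhile_imp hy
    have hdgt : ∀ y ∈ d, x < y := dropWhile_gt hx hxs
    have hcdx : d.count x = 0 := List.count_eq_zero.mpr (fun h => lt_irrefl x (hdgt x h))
    have hctx : t.count x = t.length := List.count_eq_length.mpr (fun y hy => (htx y hy).symm)
    -- count of x in the whole list
    have hcx : (x :: xs).count x = t.length + 1 := by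
      rw [hsplit]
      simp [List.count_append, hcdx, hctx]
    -- count of an element of d in the whole list
    have hcd : ∀ y ∈ d, (x :: xs).count y = d.count y := by
      intro y hy
      have hxy : x ≠ y := ne_of_lt (hdgt y hy)
      have hty : t.count y = 0 := List.count_eq_zero.mpr
        (fun h => hxy ((htx y h).symm))
      rw [hsplit]
      simp [List.count_append, hty, hxy]
    have hgo : pvGo (x :: xs) = (if t.length == 0 then x + pvGo d else pvGo d) := by
      rw [pvGo]
    have hdpair : d.Pairwise (· ≤ ·) := hxs.sublist (List.dropWhile_sublist _)
    have hdlen : d.length < n := by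
      have h1 : d.length ≤ xs.length := (List.dropWhile_sublist _).length_le
      have h2 : (x :: xs).length = n := hn
      simp at h2
      omega
    have hdsum : pvGo d = (d.filter (fun y => d.count y == 1)).sum :=
      ih d.length hdlen d hdpair rfl
    -- abstract the filter predicate so that rewriting xs does not touch it
    obtain ⟨p, hp⟩ : ∃ p, p = fun y => ((x :: xs).count y == 1) := ⟨_, rfl⟩
    have hft : t.filter p = [] := by
      rw [List.filter_eq_nil_iff]
      intro y hy
      have hlen : t.length ≠ 0 := by
        intro h0; rw [List.length_eq_zero_iff] at h0; rw [h0] at hy; simp at hy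
      rw [hp, htx y hy]
      simp only [hcx, beq_iff_eq]
      omega
    have hfd : d.filter p = d.filter (fun y => d.count y == 1) := by
      apply List.filter_congr
      intro y hy
      rw [hp]
      simp only [hcd y hy]
    have hgoal : (x :: xs).filter p
        = (if p x then [x] else []) ++ d.filter (fun y => d.count y == 1) := by
      rw [List.filter_cons, hsplit, List.filter_append, hft, hfd]
      by_cases hpx : p x = true <;> simp [hpx]
    rw [hgo, hdsum, ← hp, hgoal]
    by_cases h0 : t.length = 0
    · have hpx : p x = true := by rw [hp]; simp [hcx, h0]
      simp [h0, hpx]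
    · have hpx : ¬ p x = true := by rw [hp]; simp only [hcx, beq_iff_eq]; omega
      simp [h0, hpx]

-- proof helpers: the sweep's step and final flush as named functions (definitionally
-- equal to the inline code of the port of B)
def pvStep (acc : Int × Int × Int) (x : Int) : Int × Int × Int :=
  if acc.2.2 > 0 && x == acc.2.1 then (acc.1, acc.2.1, acc.2.2 + 1)
  else ((if acc.2.2 == 1 then acc.1 + acc.2.1 else acc.1), x, 1)

def pvFlush (st : Int × Int × Int) : Int :=
  if st.2.2 == 1 then st.1 + st.2.1 else st.1

-- the sweep, started inside a run (run_val v, run_len k ≥ 1), finishes that run and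
-- then behaves like pvGo on the remainder
lemma foldRun_eq (l : List Int) : ∀ (total v k : Int), 1 ≤ k →
    pvFlush (l.foldl pvStep (total, v, k))
    = total
      + (if k + ((l.takeWhile (fun y => y == v)).length : Int) == 1 then v else 0)
      + pvGo (l.dropWhile (fun y => y == v)) := by
  induction l with
  | nil =>
    intro total v k hk
    simp [pvFlush, pvGo]
    by_cases h1 : k = 1 <;> simp [h1]
  | cons x xs ih =>
    intro total v k hk
    by_cases hx : x = v
    · subst hx
      have hstep : pvStep (total, x, k) x = (total, x, k + 1) := by
        simp [pvStep]; omega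
      rw [List.foldl_cons, hstep, List.takeWhile_cons, List.dropWhile_cons]
      simp only [beq_self_eq_true, if_true]
      rw [ih total x (k+1) (by omega)]
      have harith : k + 1 + ((xs.takeWhile (fun y => y == x)).length : Int)
          = k + (((xs.takeWhile (fun y => y == x)).length : Int) + 1) := by ring
      simp [List.length_cons, harith]
    · have hbe : (x == v) = false := by simpa using hx
      have hstep : pvStep (total, v, k) x
          = ((if k == 1 then total + v else total), x, 1) := by
        simp [pvStep, hbe]
      rw [List.foldl_cons, hstep, List.takeWhile_cons, List.dropWhile_cons, hbe]
      simp only [Bool.false_eq_true, if_false, List.length_nil, Int.natCast_zero, add_zero]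
      rw [ih (if k == 1 then total + v else total) x 1 le_rfl]
      have hgo : pvGo (x :: xs)
          = (if ((1:Int) + ((xs.takeWhile (fun y => y == x)).length : Int) == 1) = true then x else 0)
            + pvGo (xs.dropWhile (fun y => y == x)) := by
        rw [pvGo]
        by_cases h0 : (xs.takeWhile (fun y => y == x)).length = 0
        · simp [h0]
        · have hne : ((1:Int) + ((xs.takeWhile (fun y => y == x)).length : Int) == 1) ≠ true := by
            simp only [ne_eq, beq_iff_eq]
            omega
          simp [h0, hne]
      rw [hgo]
      by_cases h1 : k = 1 <;> simp [h1] <;> ring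

-- the whole sweep equals pvGo
lemma sweep_eq_pvGo (s : List Int) : pvFlush (s.foldl pvStep (0, 0, 0)) = pvGo s := by
  cases s with
  | nil => simp [pvFlush, pvGo]
  | cons x xs =>
    have hstep : pvStep (0, 0, 0) x = (0, x, 1) := by simp [pvStep]
    rw [List.foldl_cons, hstep, foldRun_eq xs 0 x 1 le_rfl, pvGo]
    by_cases h0 : (xs.takeWhile (fun y => y == x)).length = 0
    · simp [h0]
    · have hne : ((1:Int) + ((xs.takeWhile (fun y => y == x)).length : Int) == 1) ≠ true := by
        simp only [ne_eq, beq_iff_eq]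
        omega
      simp [h0, hne]

-- ===== VERDICT (by name: the statement is the Claim_ definition above) =====
theorem sum_of_repeat_number_spec : Claim_equal_sum_of_repeat_number := by
  intro l _
  unfold Spec_sum_of_repeat_number
  have halt : sum_of_repeat_number_alt l
      = pvGo (PySem.List.sorted l (fun x => x) false) := by
    show pvFlush ((PySem.List.sorted l (fun x => x) false).foldl pvStep (0, 0, 0))
      = pvGo (PySem.List.sorted l (fun x => x) false)
    exact sweep_eq_pvGo _
  set s := PySem.List.sorted l (fun x => x) false with hsdef
  have hperm : s.Perm l := PySem.List.sorted_perm ..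
  have hpair : s.Pairwise (· ≤ ·) := by
    simpa using PySem.List.sorted_pairwise (xs := l) (key := fun x : Int => x)
  rw [halt, sum_of_repeat_number_eq_sum, pvGo_eq s hpair]
  have hcnt : ∀ y, s.count y = l.count y := fun y => hperm.count_eq y
  have hfc : s.filter (fun x => s.count x == 1) = s.filter (fun x => l.count x == 1) := by
    apply List.filter_congr; intro y _; rw [hcnt y]
  rw [hfc]
  exact ((hperm.filter _).sum_eq).symm
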